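-- pv_equiv track=rewrite | github.com/mehboobulqadri/NUST_Admission_Assistant | retrieval/retriever.py | _demote_pg
-- ===== SOURCE A (Python) =====
-- def _demote_pg(results):
--     """Push Masters FAQ results to the bottom."""
--     ug_results = []
--     pg_results = []
--
--     for r in results:
--         source = r.get("source", "").lower()
--         content = r.get("content", "").lower()
--
--         is_masters_faq = (
--             "masters faq" in source
--             or "masters program" in content
--             or "ms section" in content
--             or "ms admission" in content
--             or ("gat" in content and "general" in content)
--             or "pgadmission" in content
--         )
--
--         if is_masters_faq:
--             pg_results.append(r)
--         else:
--             ug_results.append(r)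
--
--     return ug_results + pg_results
-- ===== SOURCE B (Python) =====
-- def _is_masters_faq(r):
--     source = r.get("source", "").lower()
--     content = r.get("content", "").lower()
--     return (
--         "masters faq" in source
--         or "masters program" in content
--         or "ms section" in content
--         or "ms admission" in content
--         or ("gat" in content and "general" in content)
--         or "pgadmission" in content
--     )
--
--
-- def _demote_pg(results):
--     """Push Masters FAQ results to the bottom via one stable sort on a boolean key."""
--     return sorted(results, key=_is_masters_faq)
-- ===== Notes on version B (the rewrite author's own statement) =====
-- stated objective: simpler
-- what changed: Replaced the two-accumulator partition loop with a single stable sort on a boolean masters-FAQ predicate (False sorts before True), factored into a named helper.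
import Mathlib
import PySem

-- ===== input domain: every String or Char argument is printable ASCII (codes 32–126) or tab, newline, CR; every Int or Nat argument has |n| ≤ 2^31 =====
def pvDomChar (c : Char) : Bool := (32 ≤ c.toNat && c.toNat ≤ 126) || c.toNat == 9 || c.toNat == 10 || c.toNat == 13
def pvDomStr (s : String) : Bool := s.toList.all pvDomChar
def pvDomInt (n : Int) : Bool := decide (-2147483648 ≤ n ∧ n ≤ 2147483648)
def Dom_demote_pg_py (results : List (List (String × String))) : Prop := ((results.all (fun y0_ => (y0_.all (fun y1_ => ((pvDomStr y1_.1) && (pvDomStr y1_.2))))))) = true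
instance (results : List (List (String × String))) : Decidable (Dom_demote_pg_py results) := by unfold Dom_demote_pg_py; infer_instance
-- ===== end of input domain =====

-- B replaces A's two-accumulator partition loop by a single stable sort on a boolean key (simpler, same behaviour).

-- ===== PORT A =====
-- A: one pass with two accumulator lists, appending each r to pg_results or ug_results, then ug ++ pg.
def demote_pg_py (results : List (List (String × String))) : List (List (String × String)) :=
  let acc := results.foldl (fun acc r =>
    let source := PySem.Str.lower (PySem.Dict.getD (PySem.Dict.mk r) "source" "")
    let content := PySem.Str.lower (PySem.Dict.getD (PySem.Dict.mk r) "content" "")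
    let is_masters_faq :=
      PySem.Str.isIn "masters faq" source ||
      PySem.Str.isIn "masters program" content ||
      PySem.Str.isIn "ms section" content ||
      PySem.Str.isIn "ms admission" content ||
      (PySem.Str.isIn "gat" content && PySem.Str.isIn "general" content) ||
      PySem.Str.isIn "pgadmission" content
    if is_masters_faq then (acc.1, acc.2 ++ [r]) else (acc.1 ++ [r], acc.2)) ([], [])
  acc.1 ++ acc.2

-- ===== PORT B =====
def pvIsMastersFaq (r : List (String × String)) : Bool :=
  let source := PySem.Str.lower (PySem.Dict.getD (PySem.Dict.mk r) "source" "")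
  let content := PySem.Str.lower (PySem.Dict.getD (PySem.Dict.mk r) "content" "")
  PySem.Str.isIn "masters faq" source ||
  PySem.Str.isIn "masters program" content ||
  PySem.Str.isIn "ms section" content ||
  PySem.Str.isIn "ms admission" content ||
  (PySem.Str.isIn "gat" content && PySem.Str.isIn "general" content) ||
  PySem.Str.isIn "pgadmission" content

-- B: sorted(results, key=_is_masters_faq); bool keys ported as Int 0/1 (False < True).
def demote_pg_py_alt (results : List (List (String × String))) : List (List (String × String)) :=
  PySem.List.sorted results (fun r => if pvIsMastersFaq r then (1 : Int) else 0) false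

-- ===== PRECONDITION & SPEC =====
def Spec_demote_pg_py (results : List (List (String × String))) (out : List (List (String × String))) : Prop := out = demote_pg_py_alt results
instance (results : List (List (String × String))) (out : List (List (String × String))) : Decidable (Spec_demote_pg_py results out) := by unfold Spec_demote_pg_py; infer_instance

-- ===== CLAIM (what is proved, stated in full; the proofs are below) =====
def Claim_equal_demote_pg_py : Prop := ∀ (results : List (List (String × String))), Dom_demote_pg_py results → Spec_demote_pg_py results (demote_pg_py results)

-- ===== LEMMAS AND PROOFS =====

-- the boolean key used by B's sort
def pvKey (r : List (String × String)) : Int := if pvIsMastersFaq r then 1 else 0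

-- a key-0 element is inserted (stably) right after the key-0 prefix
lemma pv_insert0 (x : List (String × String)) (hx : pvIsMastersFaq x = false)
    (u p : List (List (String × String)))
    (hu : ∀ y ∈ u, pvIsMastersFaq y = false)
    (hp : ∀ y ∈ p, pvIsMastersFaq y = true) :
    PySem.List.insertBy (fun a b => decide (pvKey a < pvKey b)) x (u ++ p) = u ++ x :: p := by
  induction u with
  | nil =>
    cases p with
    | nil => simp [PySem.List.insertBy]
    | cons y t =>
      have hy := hp y (by simp)
      simp [PySem.List.insertBy, pvKey, hx, hy]
  | cons y t ih =>
    have hy := hu y (by simp)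
    rw [List.cons_append,
      show PySem.List.insertBy (fun a b => decide (pvKey a < pvKey b)) x (y :: (t ++ p)) =
          y :: PySem.List.insertBy (fun a b => decide (pvKey a < pvKey b)) x (t ++ p) from by
        simp [PySem.List.insertBy, pvKey, hx, hy],
      ih (fun z hz => hu z (by simp [hz]))]
    simp

-- a key-1 element is inserted at the very end
lemma pv_insert1 (x : List (String × String)) (hx : pvIsMastersFaq x = true)
    (l : List (List (String × String))) :
    PySem.List.insertBy (fun a b => decide (pvKey a < pvKey b)) x l = l ++ [x] := by
  induction l with
  | nil => simp [PySem.List.insertBy]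
  | cons y t ih =>
    have h : ¬ (pvKey x < pvKey y) := by
      simp only [pvKey, hx, if_true]
      split <;> omega
    simp [PySem.List.insertBy, h, ih]

-- A's two-accumulator fold, named
def pvStepA (acc : List (List (String × String)) × List (List (String × String)))
    (r : List (String × String)) :
    List (List (String × String)) × List (List (String × String)) :=
  if pvIsMastersFaq r then (acc.1, acc.2 ++ [r]) else (acc.1 ++ [r], acc.2)

lemma pv_foldA (xs : List (List (String × String)))
    (u p : List (List (String × String))) :
    xs.foldl pvStepA (u, p) =
      (u ++ xs.filter (fun r => !pvIsMastersFaq r), p ++ xs.filter (fun r => pvIsMastersFaq r)) := by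
  induction xs generalizing u p with
  | nil => simp
  | cons x t ih =>
    by_cases hx : pvIsMastersFaq x = true
    · simp [pvStepA, hx, ih]
    · simp only [Bool.not_eq_true] at hx
      simp [pvStepA, hx, ih]

lemma pv_foldB (xs : List (List (String × String)))
    (u p : List (List (String × String)))
    (hu : ∀ y ∈ u, pvIsMastersFaq y = false)
    (hp : ∀ y ∈ p, pvIsMastersFaq y = true) :
    xs.foldl (fun acc x => PySem.List.insertBy (fun a b => decide (pvKey a < pvKey b)) x acc) (u ++ p) =
      (u ++ xs.filter (fun r => !pvIsMastersFaq r)) ++ (p ++ xs.filter (fun r => pvIsMastersFaq r)) := by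
  induction xs generalizing u p with
  | nil => simp
  | cons x t ih =>
    by_cases hx : pvIsMastersFaq x = true
    · simp only [List.foldl_cons, pv_insert1 x hx (u ++ p), List.append_assoc]
      have := ih u (p ++ [x]) hu (by
        intro y hy
        rcases List.mem_append.mp hy with h | h
        · exact hp y h
        · simp at h; subst h; exact hx)
      simp only [List.append_assoc] at this
      rw [this]
      simp [hx]
    · simp only [Bool.not_eq_true] at hx
      simp only [List.foldl_cons, pv_insert0 x hx u p hu hp]
      have := ih (u ++ [x]) p (by
        intro y hy
        rcases List.mem_append.mp hy with h | h
        · exact hu y h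
        · simp at h; subst h; exact hx) hp
      rw [show u ++ x :: p = (u ++ [x]) ++ p by simp, this]
      simp [hx]

-- ===== VERDICT (by name: the statement is the Claim_ definition above) =====
theorem demote_pg_py_spec : Claim_equal_demote_pg_py := by
  intro results _
  show demote_pg_py results = demote_pg_py_alt results
  have hA : demote_pg_py results =
      results.filter (fun r => !pvIsMastersFaq r) ++ results.filter (fun r => pvIsMastersFaq r) := by
    have h := pv_foldA results [] []
    simp only [List.nil_append] at h
    unfold demote_pg_py
    show (results.foldl pvStepA ([], [])).1 ++ (results.foldl pvStepA ([], [])).2 = _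
    rw [h]
  have hB : demote_pg_py_alt results =
      results.filter (fun r => !pvIsMastersFaq r) ++ results.filter (fun r => pvIsMastersFaq r) := by
    unfold demote_pg_py_alt
    rw [PySem.List.sorted_eq_foldl_insertBy]
    have h := pv_foldB results [] [] (by simp) (by simp)
    simpa using h
  rw [hA, hB]
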